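-- pv_equiv track=rewrite | github.com/cybrsptl/ts-client-mock | tmp/generate-tokens.py | emit_group
-- ===== SOURCE A (Python) =====
-- def emit_group(group_name: str, items: list[tuple[str,str,str]]) -> list[str]:
--     if not items:
--         return []
--     out = [f"  /* === {group_name} === */"]
--     seen = set()
--     for css_var, hex_val, dot_path in sorted(items, key=lambda x: x[0]):
--         if css_var in seen:
--             continue
--         seen.add(css_var)
--         out.append(f"  {css_var}: {hex_val};")
--     out.append("")
--     return out
-- ===== SOURCE B (Python) =====
-- def emit_group(group_name: str, items: list[tuple[str, str, str]]) -> list[str]: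
--     if not items:
--         return []
--     first_hex = {}
--     for css_var, hex_val, _dot_path in items:
--         first_hex.setdefault(css_var, hex_val)
--     out = [f"  /* === {group_name} === */"]
--     for css_var in sorted(first_hex):
--         out.append(f"  {css_var}: {first_hex[css_var]};")
--     out.append("")
--     return out
-- ===== Notes on version B (the rewrite author's own statement) =====
-- stated objective: simpler
-- what changed: Replaces A's sort-whole-list-then-dedupe-with-a-seen-set loop by a single setdefault pass that maps each css_var to its first hex value, then one formatting pass over the sorted unique keys (the sort runs over unique keys, not the full item list).
import Mathlib
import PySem

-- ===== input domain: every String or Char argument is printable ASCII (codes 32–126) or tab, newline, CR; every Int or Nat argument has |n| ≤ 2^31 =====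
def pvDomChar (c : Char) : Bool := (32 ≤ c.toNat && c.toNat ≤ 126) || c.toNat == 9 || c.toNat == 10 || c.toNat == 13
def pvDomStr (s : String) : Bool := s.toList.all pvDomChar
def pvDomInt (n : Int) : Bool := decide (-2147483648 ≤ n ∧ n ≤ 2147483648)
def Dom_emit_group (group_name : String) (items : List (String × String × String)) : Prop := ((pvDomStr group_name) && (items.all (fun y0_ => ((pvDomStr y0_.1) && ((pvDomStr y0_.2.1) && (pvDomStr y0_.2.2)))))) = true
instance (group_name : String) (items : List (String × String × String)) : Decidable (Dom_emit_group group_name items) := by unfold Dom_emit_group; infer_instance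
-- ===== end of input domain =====

-- B replaces A's sort-everything-then-dedupe-with-a-seen-set loop by a first-value dict built in
-- one setdefault pass plus one formatting pass over the sorted unique keys (objective: simpler).

-- shared f-string formatting helpers
def pvFmtHeader (g : String) : String := "  /* === " ++ g ++ " === */"
def pvFmtLine (cv hv : String) : String := "  " ++ cv ++ ": " ++ hv ++ ";"

-- ===== PORT A =====
def emit_group (group_name : String) (items : List (String × String × String)) : List String :=
  if items = [] then []
  else
    let st := (PySem.List.sorted items (fun x => x.1) false).foldl
      (fun (st : List String × PySem.Set String) x =>
        if PySem.Set.contains st.2 x.1 then st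
        else (st.1 ++ [pvFmtLine x.1 x.2.1], PySem.Set.add st.2 x.1))
      ([pvFmtHeader group_name], PySem.Set.empty)
    st.1 ++ [""]

-- ===== PORT B =====
def emit_group_alt (group_name : String) (items : List (String × String × String)) : List String :=
  if items = [] then []
  else
    let firstHex : PySem.Dict String String :=
      items.foldl (fun d x => d.setdefault x.1 x.2.1) PySem.Dict.empty
    -- `first_hex[css_var]`: the key always comes from first_hex's own keys, so getD is exact here
    [pvFmtHeader group_name]
      ++ (PySem.List.sorted firstHex.keys (fun k => k) false).map
           (fun k => pvFmtLine k (firstHex.getD k ""))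
      ++ [""]

-- ===== PRECONDITION & SPEC =====
def Spec_emit_group (group_name : String) (items : List (String × String × String)) (out : List String) : Prop := out = emit_group_alt group_name items
instance (group_name : String) (items : List (String × String × String)) (out : List String) : Decidable (Spec_emit_group group_name items out) := by unfold Spec_emit_group; infer_instance

-- ===== CLAIM (what is proved, stated in full; the proofs are below) =====
def Claim_equal_emit_group : Prop := ∀ (group_name : String) (items : List (String × String × String)), Dom_emit_group group_name items → Spec_emit_group group_name items (emit_group group_name items)

-- ===== LEMMAS AND PROOFS =====

-- proof-only helper: the sublist of l that A's seen-set loop keeps (first item per key not yet in `seen`)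
def pvDk (l : List (String × String × String)) (seen : PySem.Set String) : List (String × String × String) :=
  match l with
  | [] => []
  | x :: xs => if PySem.Set.contains seen x.1 then pvDk xs seen else x :: pvDk xs (PySem.Set.add seen x.1)

-- A's fold emits exactly the formatted pvDk items
theorem pv_foldA (l : List (String × String × String)) (acc : List String) (seen : PySem.Set String) :
    (l.foldl (fun (st : List String × PySem.Set String) x =>
        if PySem.Set.contains st.2 x.1 then st
        else (st.1 ++ [pvFmtLine x.1 x.2.1], PySem.Set.add st.2 x.1)) (acc, seen)).1
      = acc ++ (pvDk l seen).map (fun x => pvFmtLine x.1 x.2.1) := by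
  induction l generalizing acc seen with
  | nil => simp [pvDk]
  | cons x xs ih =>
    simp only [List.foldl_cons, pvDk]
    simp only [PySem.Set.contains_eq_listContains, List.contains_eq_mem, decide_eq_true_eq] at ih ⊢
    by_cases h : x.1 ∈ seen
    · simp [h, ih]
    · simp [h, ih, List.append_assoc]

-- B's dict: lookup is the first hex for the key in original item order
theorem pv_get?_fold (l : List (String × String × String)) (d : PySem.Dict String String) (k : String) :
    (l.foldl (fun d x => d.setdefault x.1 x.2.1) d).get? k
      = (d.get? k).or ((l.find? (fun x => x.1 == k)).map (fun x => x.2.1)) := by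
  induction l generalizing d with
  | nil => simp
  | cons x xs ih =>
    simp only [List.foldl_cons, ih]
    by_cases h : k = x.1
    · subst h
      rw [PySem.Dict.get?_setdefault_self]
      rw [show List.find? (fun y => y.1 == x.1) (x :: xs) = some x from List.find?_cons_of_pos (by simp)]
      cases d.get? x.1 <;> simp
    · rw [PySem.Dict.get?_setdefault_of_ne _ _ h]
      rw [show List.find? (fun y => y.1 == k) (x :: xs) = List.find? (fun y => y.1 == k) xs from
        List.find?_cons_of_neg (by simp; exact fun hh => h hh.symm)]

-- B's dict keys, in first-insertion order
theorem pv_keys_fold (l : List (String × String × String)) (d : PySem.Dict String String) :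
    (l.foldl (fun d x => d.setdefault x.1 x.2.1) d).keys
      = PySem.Set.update d.keys (l.map (fun x => x.1)) := by
  induction l generalizing d with
  | nil => simp [PySem.Set.update_nil]
  | cons x xs ih =>
    simp only [List.foldl_cons, List.map_cons, PySem.Set.update_cons, ih,
      PySem.Dict.keys_setdefault, PySem.Set.add_eq_ite]
    by_cases h : x.1 ∈ d.keys
    · simp [h, (PySem.Dict.contains_iff_mem_keys d x.1).mpr h]
    · have : d.contains x.1 = false := by
        rw [← Bool.not_eq_true, PySem.Dict.contains_iff_mem_keys]; exact h
      simp [h, this]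

-- stability core: inserting into a key-sorted list appends to the per-key filter
theorem pv_filter_insertBy (k : String) (x : String × String × String) (ys : List (String × String × String))
    (hys : ys.Pairwise (fun a b => a.1 ≤ b.1)) :
    (PySem.List.insertBy (fun a b => decide (a.1 < b.1)) x ys).filter (fun y => y.1 == k)
      = if x.1 == k then ys.filter (fun y => y.1 == k) ++ [x] else ys.filter (fun y => y.1 == k) := by
  induction ys with
  | nil => by_cases h : x.1 = k <;> simp [PySem.List.insertBy, h]
  | cons y ys ih =>
    rw [List.pairwise_cons] at hys
    obtain ⟨hy, hys'⟩ := hys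
    simp only [PySem.List.insertBy]
    by_cases hlt : x.1 < y.1
    · rw [if_pos (by simp [hlt])]
      by_cases h : x.1 = k
      · have hnil : (y :: ys).filter (fun y => y.1 == k) = [] := by
          rw [List.filter_eq_nil_iff]
          intro z hz
          have : x.1 < z.1 := by
            rcases hz with _ | hz
            · exact hlt
            · exact lt_of_lt_of_le hlt (hy z (by assumption))
          subst h
          simp only [beq_iff_eq]
          exact fun e => ne_of_lt this e.symm
        simp [h, hnil]
      · simp [h, List.filter_cons]
    · rw [if_neg (by simp [hlt])]
      rw [List.filter_cons, List.filter_cons, ih hys']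
      by_cases h : x.1 = k <;> by_cases h2 : y.1 = k <;> simp [h, h2]

-- stability of Python's sort: the per-key subsequence is unchanged
theorem pv_filter_sorted (l : List (String × String × String)) (k : String) :
    (PySem.List.sorted l (fun x => x.1) false).filter (fun y => y.1 == k) = l.filter (fun y => y.1 == k) := by
  induction l using List.reverseRecOn with
  | nil => simp [PySem.List.sorted]
  | append_singleton t x ih =>
    rw [PySem.List.sorted_eq_foldl_insertBy, List.foldl_append, List.foldl_cons, List.foldl_nil,
      ← PySem.List.sorted_eq_foldl_insertBy]
    rw [pv_filter_insertBy k x _ (PySem.List.sorted_pairwise t (fun x => x.1)), ih,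
      List.filter_append, List.filter_cons, List.filter_nil]
    by_cases h : x.1 = k <;> simp [h]

-- each kept item is the first of its key, and its key was unseen
theorem pv_dk_find (l : List (String × String × String)) (seen : PySem.Set String)
    (x : String × String × String) (hx : x ∈ pvDk l seen) :
    l.find? (fun y => y.1 == x.1) = some x ∧ x.1 ∉ seen := by
  induction l generalizing seen with
  | nil => simp [pvDk] at hx
  | cons y ys ih =>
    simp only [pvDk] at hx
    by_cases h : y.1 ∈ seen
    · rw [if_pos ((PySem.Set.contains_iff seen y.1).mpr h)] at hx
      obtain ⟨hf, hns⟩ := ih seen hx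
      have hne : y.1 ≠ x.1 := fun e => hns (e ▸ h)
      refine ⟨?_, hns⟩
      rw [show List.find? (fun z => z.1 == x.1) (y :: ys) = List.find? (fun z => z.1 == x.1) ys from
        List.find?_cons_of_neg (by simp [hne])]
      exact hf
    · rw [if_neg (fun hc => h ((PySem.Set.contains_iff seen y.1).mp hc))] at hx
      rcases List.mem_cons.mp hx with he | hm
      · subst he
        refine ⟨?_, h⟩
        rw [show List.find? (fun z => z.1 == x.1) (x :: ys) = some x from
          List.find?_cons_of_pos (by simp)]
      · obtain ⟨hf, hns⟩ := ih (PySem.Set.add seen y.1) hm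
        rw [PySem.Set.mem_add] at hns
        push Not at hns
        have hne : y.1 ≠ x.1 := fun e => hns.2 e.symm
        refine ⟨?_, hns.1⟩
        rw [show List.find? (fun z => z.1 == x.1) (y :: ys) = List.find? (fun z => z.1 == x.1) ys from
          List.find?_cons_of_neg (by simp [hne])]
        exact hf

theorem pv_dk_sublist (l : List (String × String × String)) (seen : PySem.Set String) :
    List.Sublist (pvDk l seen) l := by
  induction l generalizing seen with
  | nil => simp [pvDk]
  | cons y ys ih =>
    simp only [pvDk]
    by_cases h : PySem.Set.contains seen y.1
    · rw [if_pos h]; exact (ih seen).cons y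
    · rw [if_neg h]; exact (ih (PySem.Set.add seen y.1)).cons₂ y

theorem pv_dk_mem_fst (l : List (String × String × String)) (seen : PySem.Set String) (k : String) :
    k ∈ (pvDk l seen).map (fun x => x.1) ↔ k ∈ l.map (fun x => x.1) ∧ k ∉ seen := by
  induction l generalizing seen with
  | nil => simp [pvDk]
  | cons y ys ih =>
    simp only [pvDk, List.map_cons, List.mem_cons]
    by_cases h : y.1 ∈ seen
    · rw [if_pos ((PySem.Set.contains_iff seen y.1).mpr h), ih seen]
      constructor
      · rintro ⟨hm, hns⟩; exact ⟨Or.inr hm, hns⟩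
      · rintro ⟨hm | hm, hns⟩
        · exact absurd (hm ▸ h) hns
        · exact ⟨hm, hns⟩
    · rw [if_neg (fun hc => h ((PySem.Set.contains_iff seen y.1).mp hc))]
      simp only [List.map_cons, List.mem_cons, ih (PySem.Set.add seen y.1), PySem.Set.mem_add]
      constructor
      · rintro (he | ⟨hm, hns⟩)
        · exact ⟨Or.inl he, he ▸ h⟩
        · push Not at hns; exact ⟨Or.inr hm, hns.1⟩
      · rintro ⟨he | hm, hns⟩
        · exact Or.inl he
        · by_cases hk : k = y.1
          · exact Or.inl hk
          · exact Or.inr ⟨hm, by push Not; exact ⟨hns, hk⟩⟩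

theorem pv_dk_nodup (l : List (String × String × String)) (seen : PySem.Set String) :
    ((pvDk l seen).map (fun x => x.1)).Nodup := by
  induction l generalizing seen with
  | nil => simp [pvDk]
  | cons y ys ih =>
    simp only [pvDk]
    by_cases h : PySem.Set.contains seen y.1
    · rw [if_pos h]; exact ih seen
    · rw [if_neg h]
      simp only [List.map_cons, List.nodup_cons]
      refine ⟨?_, ih (PySem.Set.add seen y.1)⟩
      intro hm
      have := (pv_dk_mem_fst ys (PySem.Set.add seen y.1) y.1).mp hm
      exact this.2 ((PySem.Set.mem_add seen y.1 y.1).mpr (Or.inr rfl))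

theorem pv_main (group_name : String) (items : List (String × String × String)) :
    emit_group group_name items = emit_group_alt group_name items := by
  by_cases hnil : items = []
  · simp [emit_group, emit_group_alt, hnil]
  · rw [emit_group, emit_group_alt, if_neg hnil, if_neg hnil]
    simp only
    rw [pv_foldA]
    set S := PySem.List.sorted items (fun x => x.1) false with hS
    set d := items.foldl (fun d x => d.setdefault x.1 x.2.1) PySem.Dict.empty with hd
    have hkeys : d.keys = PySem.Set.ofList (items.map (fun x => x.1)) := by
      rw [hd, pv_keys_fold]
      simp [PySem.Set.update_nil_left]
    have hsorted : PySem.List.sorted d.keys (fun k => k) false = (pvDk S PySem.Set.empty).map (fun x => x.1) := by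
      rw [hkeys]
      apply PySem.List.sorted_eq_of_perm_of_pairwise_lt
      · rw [List.perm_ext_iff_of_nodup (pv_dk_nodup S PySem.Set.empty) (PySem.Set.nodup_ofList _)]
        intro k
        rw [pv_dk_mem_fst, PySem.Set.mem_ofList]
        have hp : (S.map (fun x => x.1)).Perm (items.map (fun x => x.1)) :=
          (PySem.List.sorted_perm items (fun x => x.1) false).map _
        simp [hp.mem_iff, PySem.Set.empty]
      · have hle : ((pvDk S PySem.Set.empty).map (fun x => x.1)).Pairwise (fun a b => a ≤ b) :=
          (PySem.List.sorted_map_key_pairwise items (fun x => x.1)).sublist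
            ((pv_dk_sublist S PySem.Set.empty).map _)
        have hne : ((pvDk S PySem.Set.empty).map (fun x => x.1)).Pairwise (fun a b => a ≠ b) :=
          pv_dk_nodup S PySem.Set.empty
        exact (hle.and hne).imp (fun h => lt_of_le_of_ne h.1 h.2)
    rw [hsorted, List.map_map]
    have hmap : (pvDk S PySem.Set.empty).map ((fun k => pvFmtLine k (d.getD k "")) ∘ (fun x => x.1))
        = (pvDk S PySem.Set.empty).map (fun x => pvFmtLine x.1 x.2.1) := by
      apply List.map_congr_left
      intro x hx
      obtain ⟨hf, -⟩ := pv_dk_find S PySem.Set.empty x hx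
      have hfind : items.find? (fun y => y.1 == x.1) = some x := by
        rw [← List.head?_filter, ← pv_filter_sorted, List.head?_filter, ← hS, hf]
      have hget : d.get? x.1 = some x.2.1 := by
        rw [hd, pv_get?_fold]
        simp [hfind]
      simp [Function.comp, PySem.Dict.getD_eq_get?_getD, hget]
    rw [hmap, List.append_assoc]

-- ===== VERDICT (by name: the statement is the Claim_ definition above) =====
theorem emit_group_spec : Claim_equal_emit_group := by
  intro group_name items _
  unfold Spec_emit_group
  exact pv_main group_name items
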